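-- pv_equiv track=rewrite | github.com/ohsung0722/Algorithm-Study | 프로그래머스/2/468379. 선인장 숨기기/선인장 숨기기.py | solution
-- ===== SOURCE A (Python) =====
-- from collections import deque
--
-- def solution(m, n, h, w, drops):
--     answer = []
--     INF = len(drops) + 1 #끝까지 비 안맞는 칸 (최대값)
--
--     # 각 칸이 몇번째에 젖는지 기록
--     time = [[INF] * n for _ in range(m)]
--     for i in range(len(drops)):
--         a, b = drops[i]
--         time[a][b] = i + 1
--
--     width = n - w + 1
--     row_min = [[0] * width for _ in range(m)]
--
--     for i in range(m):
--         dq = deque() # 최소값 인덱스 저장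
--         for j in range(n):
--             # 덱 맨 뒤 값이 현재 값보다 크거나 같으면 제거 (최소값만 덱에 저장하기 위해)
--             while dq and time[i][dq[-1]] >= time[i][j]:
--                 dq.pop()
--
--             dq.append(j)
--
--             # 슬라이드 범위 밖 인덱스 제거
--             while dq and dq[0] <= j - w:
--                 dq.popleft()
--
--             # 길이 w가 완성되면서부터 최소값 기록
--             if j >= w - 1:
--                 row_min[i][j - w + 1] = time[i][dq[0]]
--
--
--     #row_min 배열에서 한번 더 슬라이드-윈도우 -> rect_min에 저장
--     height = m - h + 1
--     rect_min = [[0] * width for _ in range(height)]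
--     for j in range(width):
--         dq = deque()
--         for i in range(m):
--             while dq and row_min[dq[-1]][j] >= row_min[i][j]:
--                 dq.pop()
--
--             dq.append(i)
--
--             while dq and dq[0] <= i - h:
--                 dq.popleft()
--
--             if i >= h - 1:
--                 rect_min[i - h + 1][j] = row_min[dq[0]][j]
--
--     maxValue = -1
--     answer = [0, 0]
--
--     # 정답 탐색
--     for i in range(height):
--         for j in range(width):
--             if rect_min[i][j] > maxValue:
--                 maxValue = rect_min[i][j]
--                 answer = [i, j]
--
--     return answer
-- ===== SOURCE B (Python) =====
-- def solution(m, n, h, w, drops):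
--     INF = len(drops) + 1
--     time = [[INF] * n for _ in range(m)]
--     for i in range(len(drops)):
--         a, b = drops[i]
--         time[a][b] = i + 1
--     best = -1
--     answer = [0, 0]
--     for i in range(m - h + 1):
--         for j in range(n - w + 1):
--             block = min(min(time[i + di][j + dj] for dj in range(w)) for di in range(h))
--             if block > best:
--                 best = block
--                 answer = [i, j]
--     return answer
-- ===== Notes on version B (the rewrite author's own statement) =====
-- stated objective: simpler
-- what changed: Replaced the two monotonic-deque sliding-window-minimum passes plus the rect_min table by a direct row-major scan that recomputes each h-by-w block minimum with a nested min, keeping A's exact strict-> first-maximum tie-break.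
-- outside the precondition, e.g. on solution(1, 0, 1, 0, []): A returns [0, 0], B raises ValueError; on solution(0, 1, 0, 1, []): A returns [0, 0], B raises ValueError
import Mathlib
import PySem

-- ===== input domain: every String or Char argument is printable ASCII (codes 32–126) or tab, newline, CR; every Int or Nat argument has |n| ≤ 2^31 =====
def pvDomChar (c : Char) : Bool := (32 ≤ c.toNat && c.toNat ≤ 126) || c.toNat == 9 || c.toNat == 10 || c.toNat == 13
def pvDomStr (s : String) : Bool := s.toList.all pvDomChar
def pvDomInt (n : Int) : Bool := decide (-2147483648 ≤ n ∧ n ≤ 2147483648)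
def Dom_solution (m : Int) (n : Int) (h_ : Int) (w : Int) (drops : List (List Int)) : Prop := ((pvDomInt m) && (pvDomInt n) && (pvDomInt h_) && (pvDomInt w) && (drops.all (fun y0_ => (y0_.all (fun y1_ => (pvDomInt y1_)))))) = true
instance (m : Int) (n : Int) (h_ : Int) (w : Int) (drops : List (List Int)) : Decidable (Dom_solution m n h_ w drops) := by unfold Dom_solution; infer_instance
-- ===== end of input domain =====

-- B replaces A's two monotonic-deque sliding-window passes by a direct nested-min scan of every
-- h×w block (same answer, same row-major strict-> tie-break); simpler, not faster.

-- ===== shared helpers (the time-grid build loop is textually identical in Source A and Source B) =====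

-- Python list index with negative wraparound (exact for -len ≤ i < len, the Pre_ range).
def pvWrap (len : Nat) (i : Int) : Nat := if i < 0 then (i + len).toNat else i.toNat

-- grid[i][j] (exact for in-range indices)
def pvGet2 (g : List (List Int)) (i j : Nat) : Int := (g.getD i []).getD j 0

-- time = [[INF]*n for _ in range(m)]; for i in range(len(drops)): a,b = drops[i]; time[a][b] = i+1
def mkTime (m n : Int) (drops : List (List Int)) : List (List Int) :=
  (List.range drops.length).foldl
    (fun t i =>
      let d := drops.getD i []
      let a := pvWrap t.length (d.getD 0 0)
      let row := t.getD a []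
      t.set a (row.set (pvWrap row.length (d.getD 1 0)) ((i : Int) + 1)))
    (List.replicate m.toNat (List.replicate n.toNat ((drops.length : Int) + 1)))

-- ===== PORT A =====

-- one inner-loop step of A's monotonic deque (pop back while ≥, append j, pop front out-of-window)
def dqStep (val : Nat → Int) (wnd : Int) (dq : List Nat) (j : Nat) : List Nat :=
  (((dq.reverse.dropWhile (fun k => decide (val j ≤ val k))).reverse) ++ [j]).dropWhile
    (fun (k : Nat) => decide ((k : Int) ≤ (j : Int) - wnd))

-- A's sliding-window loop shape: deque state plus an emission (the `if j >= w-1: … = time[i][dq[0]]` write)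
def dqLoop {α : Type} (val : Nat → Int) (wnd : Int) (n : Nat)
    (emit : α → Nat → Int → α) (a0 : α) : α :=
  ((List.range n).foldl
    (fun (s : List Nat × α) j =>
      let dq := dqStep val wnd s.1 j
      (dq, if wnd - 1 ≤ (j : Int) then emit s.2 j (val (dq.headD 0)) else s.2))
    ([], a0)).2

def solution (m : Int) (n : Int) (h_ : Int) (w : Int) (drops : List (List Int)) : List Int :=
  let time := mkTime m n drops
  let width := (n - w + 1).toNat
  let row_min : List (List Int) :=
    (List.range m.toNat).map (fun i =>
      dqLoop (fun j => pvGet2 time i j) w n.toNat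
        (fun arr j x => arr.set ((j : Int) - w + 1).toNat x) (List.replicate width 0))
  let height := (m - h_ + 1).toNat
  let rect0 : List (List Int) := List.replicate height (List.replicate width 0)
  let rect :=
    (List.range width).foldl
      (fun g j =>
        dqLoop (fun i => pvGet2 row_min i j) h_ m.toNat
          (fun g2 i x =>
            let r := ((i : Int) - h_ + 1).toNat
            g2.set r ((g2.getD r []).set j x))
          g)
      rect0
  ((List.range height).foldl
    (fun (s : Int × List Int) i =>
      (List.range width).foldl
        (fun (s2 : Int × List Int) j =>
          if s2.1 < pvGet2 rect i j then (pvGet2 rect i j, [(i : Int), (j : Int)]) else s2)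
        s)
    (-1, [0, 0])).2

-- ===== PORT B =====

-- Python min() over a nonempty sequence (Pre_ keeps the blocks nonempty)
def listMin (xs : List Int) : Int :=
  match xs with
  | [] => 0
  | x :: r => r.foldl min x

def solution_alt (m : Int) (n : Int) (h_ : Int) (w : Int) (drops : List (List Int)) : List Int :=
  let time := mkTime m n drops
  ((List.range (m - h_ + 1).toNat).foldl
    (fun (s : Int × List Int) i =>
      (List.range (n - w + 1).toNat).foldl
        (fun (s2 : Int × List Int) j =>
          let block := listMin ((List.range h_.toNat).map (fun di =>
            listMin ((List.range w.toNat).map (fun dj => pvGet2 time (i + di) (j + dj)))))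
          if s2.1 < block then (block, [(i : Int), (j : Int)]) else s2)
        s)
    (-1, [0, 0])).2

-- ===== PRECONDITION & SPEC =====
-- Pre_ excludes inputs on which A raises (drops entries that are not length-2 pairs of in-range,
-- possibly negative wrapping, indices; and nonpositive w or h on a non-degenerate grid, where A's
-- deque underflows with an IndexError) and the remaining nonpositive-h/w corners where A returns
-- [0,0] but B's own min() over an empty block raises ValueError.
def Pre_solution (m : Int) (n : Int) (h_ : Int) (w : Int) (drops : List (List Int)) : Prop :=
  (∀ d ∈ drops, d.length = 2 ∧ -m ≤ d.getD 0 0 ∧ d.getD 0 0 < m ∧ -n ≤ d.getD 1 0 ∧ d.getD 1 0 < n) ∧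
  ¬ (w ≤ 0 ∧ 1 ≤ m ∧ 1 ≤ n) ∧
  ¬ (h_ ≤ 0 ∧ 1 ≤ m ∧ w ≤ n) ∧
  ¬ ((h_ ≤ 0 ∨ w ≤ 0) ∧ h_ ≤ m ∧ w ≤ n)
instance (m : Int) (n : Int) (h_ : Int) (w : Int) (drops : List (List Int)) : Decidable (Pre_solution m n h_ w drops) := by unfold Pre_solution; infer_instance

def pvWitness_solution : Int × Int × Int × Int × List (List Int) := (2, 2, 1, 1, [[0, 0], [-1, 1]])

def Spec_solution (m : Int) (n : Int) (h_ : Int) (w : Int) (drops : List (List Int)) (out : List Int) : Prop := out = solution_alt m n h_ w drops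
instance (m : Int) (n : Int) (h_ : Int) (w : Int) (drops : List (List Int)) (out : List Int) : Decidable (Spec_solution m n h_ w drops out) := by unfold Spec_solution; infer_instance

-- ===== CLAIM (what is proved, stated in full; the proofs are below) =====
def Claim_equal_solution : Prop := ∀ (m : Int) (n : Int) (h_ : Int) (w : Int) (drops : List (List Int)), Dom_solution m n h_ w drops → Pre_solution m n h_ w drops → Spec_solution m n h_ w drops (solution m n h_ w drops)

-- ===== LEMMAS AND PROOFS =====

-- minimum of the window [st, st+wt) of val
def winMin (val : Nat → Int) (wt : Nat) (st : Nat) : Int :=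
  listMin ((List.range wt).map (fun t => val (st + t)))

theorem foldl_min_le_init (l : List Int) (a : Int) : l.foldl min a ≤ a := by
  induction l generalizing a with
  | nil => simp
  | cons x r ih => exact le_trans (ih (min a x)) (min_le_left a x)

theorem foldl_min_le_mem (l : List Int) (a x : Int) (hx : x ∈ l) : l.foldl min a ≤ x := by
  induction l generalizing a with
  | nil => simp at hx
  | cons y r ih =>
    rcases List.mem_cons.mp hx with h | h
    · subst h; exact le_trans (foldl_min_le_init r (min a x)) (min_le_right a x)
    · exact ih (min a y) h

theorem foldl_min_mem (l : List Int) (a : Int) : l.foldl min a = a ∨ l.foldl min a ∈ l := by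
  induction l generalizing a with
  | nil => left; rfl
  | cons y r ih =>
    rw [List.foldl_cons]
    rcases ih (min a y) with h | h
    · rcases min_choice a y with hm | hm
      · left; exact h.trans hm
      · right; rw [h, hm]; exact List.mem_cons_self
    · right; exact List.mem_cons_of_mem _ h

theorem listMin_le (xs : List Int) (x : Int) (hx : x ∈ xs) : listMin xs ≤ x := by
  cases xs with
  | nil => simp at hx
  | cons y r =>
    rcases List.mem_cons.mp hx with h | h
    · subst h; exact foldl_min_le_init r x
    · exact foldl_min_le_mem r y x h

theorem listMin_mem (xs : List Int) (h : xs ≠ []) : listMin xs ∈ xs := by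
  cases xs with
  | nil => exact absurd rfl h
  | cons y r =>
    rcases foldl_min_mem r y with h' | h'
    · rw [listMin, h']; exact List.mem_cons_self
    · exact List.mem_cons_of_mem _ h'

theorem winMin_le (val : Nat → Int) (wt st t : Nat) (ht : t < wt) : winMin val wt st ≤ val (st + t) := by
  apply listMin_le
  exact List.mem_map_of_mem (List.mem_range.mpr ht)

theorem winMin_mem (val : Nat → Int) (wt st : Nat) (h : 0 < wt) : ∃ t < wt, winMin val wt st = val (st + t) := by
  have hne : ((List.range wt).map (fun t => val (st + t))) ≠ [] := by
    simp [List.range_eq_nil]; omega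
  have := listMin_mem _ hne
  rcases List.mem_map.mp this with ⟨t, htm, hv⟩
  exact ⟨t, List.mem_range.mp htm, hv.symm⟩

theorem winMin_eq (val : Nat → Int) (wt st : Nat) (h : 0 < wt) (x : Int)
    (hmem : ∃ t < wt, x = val (st + t)) (hle : ∀ t < wt, x ≤ val (st + t)) :
    winMin val wt st = x := by
  rcases hmem with ⟨t, htw, hx⟩
  rcases winMin_mem val wt st h with ⟨t', ht', hv⟩
  apply le_antisymm
  · rw [hx]; exact winMin_le val wt st t htw
  · rw [hv]; exact hle t' ht'

theorem winMin_congr (val₁ val₂ : Nat → Int) (wt st : Nat)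
    (h : ∀ t < wt, val₁ (st + t) = val₂ (st + t)) : winMin val₁ wt st = winMin val₂ wt st := by
  unfold winMin
  congr 1
  apply List.map_congr_left
  intro t htm
  exact h t (List.mem_range.mp htm)

-- ---- the deque invariant ----

def DqInv (val : Nat → Int) (wnd : Int) (j : Nat) (dq : List Nat) : Prop :=
  dq.Pairwise (fun a b => a < b ∧ val a < val b) ∧
  (∀ k ∈ dq, k < j ∧ (j : Int) - wnd ≤ (k : Int)) ∧
  (∀ t : Nat, t < j → (j : Int) - wnd ≤ (t : Int) → ∃ k ∈ dq, t ≤ k ∧ val k ≤ val t)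

theorem mem_dropWhile_or {α : Type} (p : α → Bool) (l : List α) (x : α) (hx : x ∈ l) :
    x ∈ l.dropWhile p ∨ p x = true := by
  induction l with
  | nil => simp at hx
  | cons a l ih =>
    by_cases hp : p a
    · rcases List.mem_cons.mp hx with h | h
      · subst h; right; exact hp
      · rw [List.dropWhile_cons_of_pos hp]; exact ih h
    · rw [List.dropWhile_cons_of_neg hp]; left; exact hx

theorem last_mem_dropWhile {α : Type} (p : α → Bool) (l : List α) (x : α) (hx : p x = false) :
    x ∈ (l ++ [x]).dropWhile p := by
  induction l with
  | nil => simp [hx]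
  | cons a l ih =>
    by_cases hp : p a
    · rw [List.cons_append, List.dropWhile_cons_of_pos hp]; exact ih
    · rw [List.cons_append, List.dropWhile_cons_of_neg hp]
      exact List.mem_cons_of_mem _ (by simp)

theorem dropWhile_bound (l : List Nat) (b : Int) (h : l.Pairwise (fun a c => a < c)) :
    ∀ x ∈ l.dropWhile (fun (k : Nat) => decide ((k : Int) ≤ b)), b < (x : Int) := by
  induction l with
  | nil => simp
  | cons a l ih =>
    rcases List.pairwise_cons.mp h with ⟨ha, hl⟩
    by_cases hp : (a : Int) ≤ b
    · rw [List.dropWhile_cons_of_pos (by simpa using hp)]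
      exact ih hl
    · rw [List.dropWhile_cons_of_neg (by simpa using hp)]
      intro x hx
      rcases List.mem_cons.mp hx with h' | h'
      · subst h'; omega
      · have := ha x h'; omega

theorem pairwise_append_last (R : Nat → Nat → Prop) (htr : ∀ a b c, R a b → R b c → R a c) (l : List Nat) (x : Nat)
    (h : l.Pairwise R) (hl : ∀ y, l.getLast? = some y → R y x) : (l ++ [x]).Pairwise R := by
  induction l with
  | nil => simp
  | cons a l ih =>
    rcases List.pairwise_cons.mp h with ⟨ha, hp⟩
    rw [List.cons_append, List.pairwise_cons]
    cases l with
    | nil =>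
      refine ⟨?_, by simp⟩
      intro b hb
      simp at hb
      subst hb
      exact hl a (by simp)
    | cons a' l' =>
      have hlast : ∀ y, (a' :: l').getLast? = some y → R y x := by
        intro y hy
        apply hl
        rw [List.getLast?_cons_cons]
        exact hy
      refine ⟨?_, ih hp hlast⟩
      intro b hb
      rcases List.mem_append.mp hb with h' | h'
      · exact ha b h'
      · have hx : b = x := by simpa using h'
        subst hx
        have hy := (a' :: l').getLast?_eq_some_getLast (by simp)
        have hmem : (a' :: l').getLast (by simp) ∈ (a' :: l') := List.getLast_mem _
        exact htr _ _ _ (ha _ hmem) (hlast _ hy)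

theorem head_dropWhile_false {α : Type} (p : α → Bool) :
    ∀ (l : List α) (y : α), (l.dropWhile p).head? = some y → p y = false := by
  intro l
  induction l with
  | nil => intro y hy; simp [List.dropWhile] at hy
  | cons a l ih =>
    intro y hy
    by_cases hp : p a
    · rw [List.dropWhile_cons_of_pos hp] at hy; exact ih y hy
    · rw [List.dropWhile_cons_of_neg hp] at hy
      simp at hy
      subst hy
      exact Bool.eq_false_iff.mpr hp

theorem mem_of_getLast?' {α : Type} (l : List α) (y : α) (h : l.getLast? = some y) : y ∈ l := by
  cases l with
  | nil => simp at h
  | cons a t =>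
    rw [List.getLast?_eq_some_getLast (show (a :: t) ≠ [] by simp)] at h
    have hy : y = (a :: t).getLast (by simp) := by
      injection h with h'
      exact h'.symm
    rw [hy]
    exact List.getLast_mem _

theorem getD_set {α : Type} (l : List α) (i : Nat) (x d : α) (j : Nat) :
    (l.set i x).getD j d = if i = j ∧ i < l.length then x else l.getD j d := by
  simp only [List.getD, List.getElem?_set]
  by_cases hij : i = j
  · subst hij
    by_cases hl : i < l.length
    · simp [hl]
    · simp [hl]
  · simp [hij]

theorem getD_map_range {α : Type} (f : Nat → α) (d : α) (L k : Nat) (hk : k < L) :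
    (((List.range L).map f).getD k d) = f k := by
  simp [List.getD, hk]

theorem popBack_split (val : Nat → Int) (j : Nat) (dq : List Nat) :
    ∃ rem, dq = (dq.reverse.dropWhile (fun k => decide (val j ≤ val k))).reverse ++ rem ∧
      (∀ k ∈ rem, val j ≤ val k) ∧
      (∀ y, ((dq.reverse.dropWhile (fun k => decide (val j ≤ val k))).reverse).getLast? = some y → val y < val j) := by
  refine ⟨(dq.reverse.takeWhile (fun k => decide (val j ≤ val k))).reverse, ?_, ?_, ?_⟩
  · rw [← List.reverse_append, List.takeWhile_append_dropWhile, List.reverse_reverse]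
  · intro k hk
    rw [List.mem_reverse] at hk
    have := List.mem_takeWhile_imp hk
    simpa using this
  · intro y hy
    rw [List.getLast?_reverse] at hy
    have := head_dropWhile_false _ _ _ hy
    simpa using this

theorem step_mem (val : Nat → Int) (wnd : Int) (hw : 1 ≤ wnd) (j : Nat) (dq : List Nat) :
    j ∈ dqStep val wnd dq j := by
  unfold dqStep
  apply last_mem_dropWhile
  simp
  omega

theorem inv_step (val : Nat → Int) (wnd : Int) (hw : 1 ≤ wnd) (j : Nat) (dq : List Nat)
    (h : DqInv val wnd j dq) : DqInv val wnd (j + 1) (dqStep val wnd dq j) := by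
  obtain ⟨hpw, hbnd, hcov⟩ := h
  obtain ⟨rem, hsplit, hrem, hlast⟩ := popBack_split val j dq
  have hstep : dqStep val wnd dq j =
      (((dq.reverse.dropWhile (fun k => decide (val j ≤ val k))).reverse) ++ [j]).dropWhile
        (fun (k : Nat) => decide ((k : Int) ≤ (j : Int) - wnd)) := rfl
  rw [hstep]
  have hjmem : j ∈ dqStep val wnd dq j := step_mem val wnd hw j dq
  rw [hstep] at hjmem
  have hpw1 : ((dq.reverse.dropWhile (fun k => decide (val j ≤ val k))).reverse).Pairwise
      (fun a b => a < b ∧ val a < val b) := by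
    rw [hsplit] at hpw
    exact (List.pairwise_append.mp hpw).1
  have hmem1 : ∀ k ∈ (dq.reverse.dropWhile (fun k => decide (val j ≤ val k))).reverse, k ∈ dq := by
    intro k hk; rw [hsplit]; exact List.mem_append_left _ hk
  have htr : ∀ a b c : Nat, (a < b ∧ val a < val b) → (b < c ∧ val b < val c) → (a < c ∧ val a < val c) :=
    fun a b c h1 h2 => ⟨Nat.lt_trans h1.1 h2.1, lt_trans h1.2 h2.2⟩
  have hpw2 : (((dq.reverse.dropWhile (fun k => decide (val j ≤ val k))).reverse) ++ [j]).Pairwise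
      (fun a b => a < b ∧ val a < val b) := by
    apply pairwise_append_last _ htr _ _ hpw1
    intro y hy
    have hym : y ∈ (dq.reverse.dropWhile (fun k => decide (val j ≤ val k))).reverse :=
      mem_of_getLast?' _ _ hy
    exact ⟨(hbnd y (hmem1 _ hym)).1, hlast y hy⟩
  have hpwlt : (((dq.reverse.dropWhile (fun k => decide (val j ≤ val k))).reverse) ++ [j]).Pairwise
      (fun a b : Nat => a < b) := hpw2.imp (fun h => h.1)
  refine ⟨List.Pairwise.sublist (List.dropWhile_sublist _) hpw2, ?_, ?_⟩
  · intro k hk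
    have hk2 : k ∈ ((dq.reverse.dropWhile (fun k => decide (val j ≤ val k))).reverse) ++ [j] :=
      List.Sublist.subset (List.dropWhile_sublist _) hk
    constructor
    · rcases List.mem_append.mp hk2 with h' | h'
      · have := (hbnd k (hmem1 _ h')).1; omega
      · simp at h'; omega
    · have := dropWhile_bound _ ((j : Int) - wnd) hpwlt k hk
      push_cast
      omega
  · intro t ht htl
    by_cases hteq : t = j
    · subst hteq
      exact ⟨t, hjmem, le_refl _, le_refl _⟩
    · have htj : t < j := by omega
      have htl' : (j : Int) - wnd ≤ (t : Int) := by push_cast at htl ⊢; omega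
      obtain ⟨k, hkdq, htk, hvk⟩ := hcov t htj htl'
      rw [hsplit] at hkdq
      rcases List.mem_append.mp hkdq with hk1 | hkrem
      · have hk2 : k ∈ ((dq.reverse.dropWhile (fun k => decide (val j ≤ val k))).reverse) ++ [j] :=
          List.mem_append_left _ hk1
        rcases mem_dropWhile_or _ _ _ hk2 with hin | hq
        · exact ⟨k, hin, htk, hvk⟩
        · exfalso
          simp at hq
          push_cast at htl
          omega
      · exact ⟨j, hjmem, by omega, le_trans (hrem k hkrem) hvk⟩

def dqAfter (val : Nat → Int) (wnd : Int) (n : Nat) : List Nat :=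
  (List.range n).foldl (dqStep val wnd) []

theorem dqAfter_succ (val : Nat → Int) (wnd : Int) (n : Nat) :
    dqAfter val wnd (n + 1) = dqStep val wnd (dqAfter val wnd n) n := by
  unfold dqAfter
  rw [List.range_succ, List.foldl_append, List.foldl_cons, List.foldl_nil]

theorem inv_after (val : Nat → Int) (wnd : Int) (hw : 1 ≤ wnd) (n : Nat) :
    DqInv val wnd n (dqAfter val wnd n) := by
  induction n with
  | zero =>
    refine ⟨by simp [dqAfter], by simp [dqAfter], ?_⟩
    intro t ht
    omega
  | succ n ih =>
    rw [dqAfter_succ]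
    exact inv_step val wnd hw n _ ih

theorem head_min (val : Nat → Int) (wnd : Int) (hw : 1 ≤ wnd) (j : Nat) (dq' : List Nat)
    (hmem : j ∈ dq') (hinv : DqInv val wnd (j + 1) dq') (hrec : wnd - 1 ≤ (j : Int)) :
    val (dq'.headD 0) = winMin val wnd.toNat ((j : Int) - wnd + 1).toNat := by
  obtain ⟨hpw, hbnd, hcov⟩ := hinv
  cases dq' with
  | nil => simp at hmem
  | cons h0 rest =>
    simp only [List.headD_cons]
    have hb := hbnd h0 List.mem_cons_self
    have hst : (((j : Int) - wnd + 1).toNat : Int) = (j : Int) - wnd + 1 := by omega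
    symm
    apply winMin_eq
    · omega
    · refine ⟨h0 - ((j : Int) - wnd + 1).toNat, by omega, ?_⟩
      congr 1
      omega
    · intro t htw
      have h1 : ((j : Int) - wnd + 1).toNat + t < j + 1 := by omega
      have h2 : ((j + 1 : Nat) : Int) - wnd ≤ ((((j : Int) - wnd + 1).toNat + t : Nat) : Int) := by
        push_cast
        omega
      obtain ⟨k, hk, htk, hvk⟩ := hcov _ h1 h2
      have hh0 : val h0 ≤ val k := by
        rcases List.mem_cons.mp hk with he | hr
        · rw [he]
        · exact le_of_lt ((List.pairwise_cons.mp hpw).1 k hr).2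
      exact le_trans hh0 hvk

theorem dqLoop_spec {α : Type} (val : Nat → Int) (wnd : Int) (hw : 1 ≤ wnd) (n : Nat)
    (emit : α → Nat → Int → α) (a0 : α) :
    dqLoop val wnd n emit a0 =
      (List.range n).foldl
        (fun a (j : Nat) => if wnd - 1 ≤ (j : Int) then
            emit a j (winMin val wnd.toNat (((j : Int) - wnd + 1).toNat)) else a) a0 := by
  have key : ∀ N : Nat,
      (List.range N).foldl
        (fun (s : List Nat × α) j =>
          let dq := dqStep val wnd s.1 j
          (dq, if wnd - 1 ≤ (j : Int) then emit s.2 j (val (dq.headD 0)) else s.2)) ([], a0)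
      = (dqAfter val wnd N,
         (List.range N).foldl
           (fun a (j : Nat) => if wnd - 1 ≤ (j : Int) then
              emit a j (winMin val wnd.toNat (((j : Int) - wnd + 1).toNat)) else a) a0) := by
    intro N
    induction N with
    | zero => simp [dqAfter]
    | succ N ih =>
      rw [List.range_succ, List.foldl_append, List.foldl_append, ih,
        List.foldl_cons, List.foldl_nil, List.foldl_cons, List.foldl_nil]
      simp only
      rw [← dqAfter_succ]
      by_cases hc : wnd - 1 ≤ (N : Int)
      · rw [if_pos hc, if_pos hc]
        have hval : val ((dqAfter val wnd (N + 1)).headD 0)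
            = winMin val wnd.toNat (((N : Int) - wnd + 1).toNat) := by
          apply head_min val wnd hw N _ ?_ (inv_after val wnd hw (N + 1)) hc
          rw [dqAfter_succ]
          exact step_mem val wnd hw N _
        rw [hval]
      · rw [if_neg hc, if_neg hc]
  unfold dqLoop
  rw [key n]

-- ---- write-once fill lemmas ----

theorem fill1 (f : Nat → Int) (wt : Nat) (hwt : 1 ≤ wt) :
    ∀ (n' : Nat) (init : List Int), n' + 1 - wt ≤ init.length →
    (List.range n').foldl (fun arr j => if wt - 1 ≤ j then arr.set (j + 1 - wt) (f j) else arr) init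
      = ((List.range (n' + 1 - wt)).map (fun k => f (k + (wt - 1)))) ++ init.drop (n' + 1 - wt) := by
  intro n'
  induction n' with
  | zero =>
    intro init h
    have h0 : 0 + 1 - wt = 0 := by omega
    simp [h0]
  | succ n' ih =>
    intro init hlen
    rw [List.range_succ, List.foldl_append, ih init (by omega), List.foldl_cons, List.foldl_nil]
    by_cases hc : wt - 1 ≤ n'
    · rw [if_pos hc]
      have hcut : n' + 1 - wt < init.length := by omega
      have h2 : n' + 1 + 1 - wt = (n' + 1 - wt) + 1 := by omega
      rw [h2, List.range_succ, List.map_append]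
      have hlenmap : ((List.range (n' + 1 - wt)).map (fun k => f (k + (wt - 1)))).length = n' + 1 - wt := by
        simp
      rw [List.set_append_right _ _ (by omega)]
      rw [hlenmap]
      have hidx : n' + 1 - wt - (n' + 1 - wt) = 0 := by omega
      rw [hidx]
      rw [List.drop_eq_getElem_cons hcut]
      rw [List.set_cons_zero]
      have hfc : (n' + 1 - wt) + (wt - 1) = n' := by omega
      simp [hfc]
    · rw [if_neg hc]
      have h2 : n' + 1 + 1 - wt = n' + 1 - wt := by omega
      rw [h2]

theorem fill2 (fc : Nat → Int) (ht : Nat) (hht : 1 ≤ ht) (jc : Nat) :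
    ∀ (m' : Nat) (G : List (List Int)),
    ((List.range m').foldl
      (fun g i => if ht - 1 ≤ i then g.set (i + 1 - ht) ((g.getD (i + 1 - ht) []).set jc (fc i)) else g) G).length = G.length ∧
    (∀ r, (((List.range m').foldl
      (fun g i => if ht - 1 ≤ i then g.set (i + 1 - ht) ((g.getD (i + 1 - ht) []).set jc (fc i)) else g) G).getD r []).length = (G.getD r []).length) ∧
    (∀ r c, pvGet2 ((List.range m').foldl
      (fun g i => if ht - 1 ≤ i then g.set (i + 1 - ht) ((g.getD (i + 1 - ht) []).set jc (fc i)) else g) G) r c =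
      if r < m' + 1 - ht ∧ r < G.length ∧ c = jc ∧ jc < (G.getD r []).length then fc (r + (ht - 1))
      else pvGet2 G r c) := by
  intro m'
  induction m' with
  | zero =>
    intro G
    refine ⟨by simp, by simp, ?_⟩
    intro r c
    have h0 : 0 + 1 - ht = 0 := by omega
    simp [h0]
  | succ m' ih =>
    intro G
    obtain ⟨ihl, ihrow, ihval⟩ := ih G
    rw [List.range_succ, List.foldl_append, List.foldl_cons, List.foldl_nil]
    by_cases hc : ht - 1 ≤ m'
    swap
    · rw [if_neg hc]
      have h2 : m' + 1 + 1 - ht = m' + 1 - ht := by omega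
      rw [h2]
      exact ⟨ihl, ihrow, ihval⟩
    rw [if_pos hc]
    set g := (List.range m').foldl
      (fun g i => if ht - 1 ≤ i then g.set (i + 1 - ht) ((g.getD (i + 1 - ht) []).set jc (fc i)) else g) G with hg
    refine ⟨?_, ?_, ?_⟩
    · rw [List.length_set]; exact ihl
    · intro r
      rw [getD_set]
      split_ifs with h'
      · rw [List.length_set, ← h'.1]
        exact ihrow _
      · exact ihrow r
    · intro r c
      show ((g.set (m' + 1 - ht) ((g.getD (m' + 1 - ht) []).set jc (fc m'))).getD r []).getD c 0 = _
      rw [getD_set]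
      by_cases hr : (m' + 1 - ht = r ∧ m' + 1 - ht < g.length)
      · rw [if_pos hr]
        rw [getD_set]
        obtain ⟨hr1, hr2⟩ := hr
        have hrowlen : (g.getD (m' + 1 - ht) []).length = (G.getD (m' + 1 - ht) []).length := ihrow _
        by_cases hcc : (jc = c ∧ jc < (g.getD (m' + 1 - ht) []).length)
        · rw [if_pos hcc]
          rw [if_pos ?_]
          · congr 1; omega
          · refine ⟨by omega, by rw [← ihl]; omega, hcc.1.symm, ?_⟩
            rw [← hr1, ← hrowlen]
            exact hcc.2
        · rw [if_neg hcc]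
          have hmid : (g.getD (m' + 1 - ht) []).getD c 0 = pvGet2 g r c := by
            rw [hr1]; rfl
          rw [hmid, ihval r c]
          have hnc : ¬ (r < m' + 1 - ht ∧ r < G.length ∧ c = jc ∧ jc < (G.getD r []).length) := by
            rintro ⟨ha, -, -, -⟩; omega
          rw [if_neg hnc]
          have hnc2 : ¬ (r < m' + 1 + 1 - ht ∧ r < G.length ∧ c = jc ∧ jc < (G.getD r []).length) := by
            rintro ⟨-, -, hc1, hc2⟩
            apply hcc
            refine ⟨hc1.symm, ?_⟩
            rw [hrowlen, hr1]
            exact hc2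
          rw [if_neg hnc2]
      · rw [if_neg hr]
        show pvGet2 g r c = _
        rw [ihval r c]
        by_cases hreq : r = m' + 1 - ht
        · -- then r ≥ g.length, i.e. out of bounds: both conditions false
          have hge : ¬ (m' + 1 - ht < g.length) := by
            intro hlt; exact hr ⟨hreq.symm, hlt⟩
          have h1 : ¬ (r < m' + 1 - ht ∧ r < G.length ∧ c = jc ∧ jc < (G.getD r []).length) := by
            rintro ⟨ha, -, -, -⟩; omega
          have h2 : ¬ (r < m' + 1 + 1 - ht ∧ r < G.length ∧ c = jc ∧ jc < (G.getD r []).length) := by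
            rintro ⟨-, hb, -, -⟩
            rw [← ihl] at hb
            exact hge (hreq ▸ hb)
          rw [if_neg h1, if_neg h2]
        · by_cases h1 : (r < m' + 1 - ht ∧ r < G.length ∧ c = jc ∧ jc < (G.getD r []).length)
          · rw [if_pos h1, if_pos ⟨by omega, h1.2.1, h1.2.2.1, h1.2.2.2⟩]
          · rw [if_neg h1]
            have h2 : ¬ (r < m' + 1 + 1 - ht ∧ r < G.length ∧ c = jc ∧ jc < (G.getD r []).length) := by
              rintro ⟨ha, hb, hc1, hd⟩
              exact h1 ⟨by omega, hb, hc1, hd⟩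
            rw [if_neg h2]

theorem foldl_congr_weak {α β : Type} (l : List β) (f g : α → β → α) (a : α)
    (h : ∀ a' x, x ∈ l → f a' x = g a' x) : l.foldl f a = l.foldl g a := by
  induction l generalizing a with
  | nil => rfl
  | cons x r ih =>
    rw [List.foldl_cons, List.foldl_cons, h a x (by simp)]
    exact ih _ (fun a' y hy => h a' y (List.mem_cons_of_mem _ hy))

theorem rowchar (val : Nat → Int) (w : Int) (hw : 1 ≤ w) (n : Int) :
    dqLoop val w n.toNat (fun arr j x => arr.set ((j : Int) - w + 1).toNat x)
        (List.replicate (n - w + 1).toNat 0)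
      = (List.range (n - w + 1).toNat).map (fun k => winMin val w.toNat k) := by
  have hwidth : (n - w + 1).toNat = n.toNat + 1 - w.toNat := by omega
  rw [dqLoop_spec val w hw]
  rw [foldl_congr_weak _ _
    (fun (a : List Int) (j : Nat) => if w.toNat - 1 ≤ j then
      a.set (j + 1 - w.toNat) (winMin val w.toNat (j + 1 - w.toNat)) else a) _
    ?hcv]
  case hcv =>
    intro a j _
    dsimp only
    by_cases hc : w - 1 ≤ (j : Int)
    · rw [if_pos hc, if_pos (by omega)]
      have h1 : ((j : Int) - w + 1).toNat = j + 1 - w.toNat := by omega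
      rw [h1]
    · rw [if_neg hc, if_neg (by omega)]
  rw [fill1 (fun jj => winMin val w.toNat (jj + 1 - w.toNat)) w.toNat (by omega) n.toNat _
    (by rw [List.length_replicate]; omega)]
  have hdrop : (List.replicate (n - w + 1).toNat (0 : Int)).drop (n.toNat + 1 - w.toNat) = [] := by
    rw [List.drop_replicate]
    have : (n - w + 1).toNat - (n.toNat + 1 - w.toNat) = 0 := by omega
    rw [this]
    rfl
  rw [hdrop, List.append_nil, ← hwidth]
  apply List.map_congr_left
  intro k hk
  have hkw := List.mem_range.mp hk
  congr 1
  omega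

theorem rectchar (Rm : List (List Int)) (h_ : Int) (hh : 1 ≤ h_) (m' : Nat) :
    ∀ (cols : List Nat) (G : List (List Int)),
    (cols.foldl (fun g jc => dqLoop (fun i => pvGet2 Rm i jc) h_ m'
        (fun g2 i x =>
          g2.set ((i : Int) - h_ + 1).toNat ((g2.getD ((i : Int) - h_ + 1).toNat []).set jc x)) g) G).length = G.length ∧
    (∀ r, ((cols.foldl (fun g jc => dqLoop (fun i => pvGet2 Rm i jc) h_ m'
        (fun g2 i x =>
          g2.set ((i : Int) - h_ + 1).toNat ((g2.getD ((i : Int) - h_ + 1).toNat []).set jc x)) g) G).getD r []).length = (G.getD r []).length) ∧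
    (∀ r c, pvGet2 (cols.foldl (fun g jc => dqLoop (fun i => pvGet2 Rm i jc) h_ m'
        (fun g2 i x =>
          g2.set ((i : Int) - h_ + 1).toNat ((g2.getD ((i : Int) - h_ + 1).toNat []).set jc x)) g) G) r c =
      if r < m' + 1 - h_.toNat ∧ r < G.length ∧ c ∈ cols ∧ c < (G.getD r []).length
      then winMin (fun i => pvGet2 Rm i c) h_.toNat r
      else pvGet2 G r c) := by
  intro cols
  induction cols with
  | nil =>
    intro G
    refine ⟨rfl, fun r => rfl, ?_⟩
    intro r c
    simp
  | cons jc rest ih =>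
    intro G
    rw [List.foldl_cons]
    -- first the step for column jc
    have hcol : dqLoop (fun i => pvGet2 Rm i jc) h_ m'
        (fun g2 i x =>
          g2.set ((i : Int) - h_ + 1).toNat ((g2.getD ((i : Int) - h_ + 1).toNat []).set jc x)) G
      = (List.range m').foldl
          (fun g i => if h_.toNat - 1 ≤ i then
            g.set (i + 1 - h_.toNat) ((g.getD (i + 1 - h_.toNat) []).set jc
              (winMin (fun i' => pvGet2 Rm i' jc) h_.toNat (i + 1 - h_.toNat))) else g) G := by
      rw [dqLoop_spec _ h_ hh]
      apply foldl_congr_weak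
      intro a i _
      dsimp only
      by_cases hc : h_ - 1 ≤ (i : Int)
      · rw [if_pos hc, if_pos (by omega)]
        have h1 : ((i : Int) - h_ + 1).toNat = i + 1 - h_.toNat := by omega
        rw [h1]
      · rw [if_neg hc, if_neg (by omega)]
    rw [hcol]
    obtain ⟨f2l, f2row, f2val⟩ := fill2
      (fun ii => winMin (fun i' => pvGet2 Rm i' jc) h_.toNat (ii + 1 - h_.toNat)) h_.toNat
      (by omega) jc m' G
    obtain ⟨ihl, ihrow, ihval⟩ := ih ((List.range m').foldl
          (fun g i => if h_.toNat - 1 ≤ i then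
            g.set (i + 1 - h_.toNat) ((g.getD (i + 1 - h_.toNat) []).set jc
              (winMin (fun i' => pvGet2 Rm i' jc) h_.toNat (i + 1 - h_.toNat))) else g) G)
    refine ⟨by rw [ihl, f2l], fun r => by rw [ihrow r, f2row r], ?_⟩
    intro r c
    rw [ihval r c]
    by_cases hrest : (r < m' + 1 - h_.toNat ∧ r < G.length ∧ c ∈ rest ∧ c < (G.getD r []).length)
    · rw [if_pos (by
        refine ⟨hrest.1, by rw [f2l]; exact hrest.2.1, hrest.2.2.1, by rw [f2row r]; exact hrest.2.2.2⟩)]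
      rw [if_pos ⟨hrest.1, hrest.2.1, List.mem_cons_of_mem _ hrest.2.2.1, hrest.2.2.2⟩]
    · rw [if_neg (by
        rintro ⟨ha, hb, hcm, hd⟩
        apply hrest
        exact ⟨ha, by rw [← f2l]; exact hb, hcm, by rw [← f2row r]; exact hd⟩)]
      rw [f2val r c]
      by_cases hjc : (r < m' + 1 - h_.toNat ∧ r < G.length ∧ c = jc ∧ jc < (G.getD r []).length)
      · rw [if_pos hjc]
        rw [if_pos ⟨hjc.1, hjc.2.1, by rw [hjc.2.2.1]; exact List.mem_cons_self, by rw [hjc.2.2.1]; exact hjc.2.2.2⟩]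
        rw [hjc.2.2.1]
        congr 1
        omega
      · rw [if_neg hjc]
        rw [if_neg (by
          rintro ⟨ha, hb, hcm, hd⟩
          rcases List.mem_cons.mp hcm with he | he
          · exact hjc ⟨ha, hb, he, he ▸ hd⟩
          · exact hrest ⟨ha, hb, he, hd⟩)]

-- ===== VERDICT (by name: the statement is the Claim_ definition above) =====
theorem foldl_id {α β : Type} (l : List β) (a : α) : l.foldl (fun a _ => a) a = a := by
  induction l generalizing a with
  | nil => rfl
  | cons x r ih => exact ih a

theorem solution_spec : Claim_equal_solution := by
  intro m n h_ w drops _ hpre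
  obtain ⟨-, hA1, hA2, hB⟩ := hpre
  by_cases hmain : 1 ≤ h_ ∧ 1 ≤ w
  case neg =>
    -- degenerate corner admitted by Pre_: one of the two scan ranges is empty and
    -- both ports return the initial answer [0, 0]
    have hdeg : (m - h_ + 1).toNat = 0 ∨ (n - w + 1).toNat = 0 := by omega
    unfold Spec_solution solution solution_alt
    dsimp only
    rcases hdeg with h0 | h0 <;>
      rw [h0] <;>
      first
        | rfl
        | (simp only [List.range_zero, List.foldl_nil]; rw [foldl_id, foldl_id])
  obtain ⟨hh, hw⟩ := hmain
  unfold Spec_solution solution solution_alt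
  dsimp only
  have hH : (m - h_ + 1).toNat = m.toNat + 1 - h_.toNat := by omega
  have hW : (n - w + 1).toNat = n.toNat + 1 - w.toNat := by omega
  -- rewrite the row pass
  rw [show (fun (i : Nat) => dqLoop (fun j => pvGet2 (mkTime m n drops) i j) w n.toNat
        (fun arr j x => arr.set ((j : Int) - w + 1).toNat x)
        (List.replicate (n - w + 1).toNat 0))
      = (fun (i : Nat) => (List.range (n - w + 1).toNat).map
          (fun k => winMin (fun j => pvGet2 (mkTime m n drops) i j) w.toNat k)) from
    funext (fun i => rowchar (fun j => pvGet2 (mkTime m n drops) i j) w hw n)]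
  -- characterise the rect grid
  obtain ⟨hrl, hrrow, hrval⟩ := rectchar
    ((List.range m.toNat).map (fun i => (List.range (n - w + 1).toNat).map
      (fun k => winMin (fun j => pvGet2 (mkTime m n drops) i j) w.toNat k))) h_ hh m.toNat
    (List.range (n - w + 1).toNat)
    (List.replicate (m - h_ + 1).toNat (List.replicate (n - w + 1).toNat 0))
  -- cell values of the rect grid equal B's block minima
  have hcell : ∀ i j : Nat, i < (m - h_ + 1).toNat → j < (n - w + 1).toNat →
      pvGet2 ((List.range (n - w + 1).toNat).foldl
        (fun g jc => dqLoop (fun i' => pvGet2 ((List.range m.toNat).map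
            (fun i'' => (List.range (n - w + 1).toNat).map
              (fun k => winMin (fun j' => pvGet2 (mkTime m n drops) i'' j') w.toNat k))) i' jc) h_ m.toNat
          (fun g2 i' x =>
            g2.set ((i' : Int) - h_ + 1).toNat ((g2.getD ((i' : Int) - h_ + 1).toNat []).set jc x)) g)
        (List.replicate (m - h_ + 1).toNat (List.replicate (n - w + 1).toNat 0))) i j
      = listMin ((List.range h_.toNat).map (fun di =>
          listMin ((List.range w.toNat).map (fun dj => pvGet2 (mkTime m n drops) (i + di) (j + dj))))) := by
    intro i j hi hj
    rw [hrval i j]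
    rw [if_pos ⟨by omega, by rw [List.length_replicate]; omega, List.mem_range.mpr hj, by
      rw [List.getD_eq_getElem?_getD, List.getElem?_replicate, if_pos (by omega)]
      simp
      omega⟩]
    have hconv : winMin (fun i' => pvGet2 ((List.range m.toNat).map
        (fun i'' => (List.range (n - w + 1).toNat).map
          (fun k => winMin (fun j' => pvGet2 (mkTime m n drops) i'' j') w.toNat k))) i' j) h_.toNat i
      = winMin (fun i' => winMin (fun j' => pvGet2 (mkTime m n drops) i' j') w.toNat j) h_.toNat i := by
      apply winMin_congr
      intro t htl
      show pvGet2 _ (i + t) j = _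
      unfold pvGet2
      rw [getD_map_range _ _ _ _ (by omega : i + t < m.toNat)]
      rw [getD_map_range _ _ _ _ hj]
    rw [hconv]
    rfl
  -- the two scans are equal pointwise
  apply congrArg Prod.snd
  apply foldl_congr_weak
  intro s i hi
  apply foldl_congr_weak
  intro s2 j hj
  rw [hcell i j (List.mem_range.mp hi) (List.mem_range.mp hj)]
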